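-- pv_equiv track=rewrite | github.com/msrishav-28/FinDocGPT | backend/app/services/anomaly_service.py | _generate_pattern_summary
-- ===== SOURCE A (Python) =====
-- from typing import Dict, List, Optional, Tuple, Any, Union
--
-- def _generate_pattern_summary(
--
--     pattern_types: List[str],
--     total_anomalies: int
-- ) -> str:
--     """Generate summary of detected patterns"""
--
--     if total_anomalies == 0:
--         return "No significant pattern anomalies detected"
--
--     pattern_counts = {}
--     for pattern_type in pattern_types:
--         pattern_counts[pattern_type] = pattern_counts.get(pattern_type, 0) + 1
--
--     summary_parts = [f"Detected {total_anomalies} pattern anomalies"]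
--
--     if pattern_counts:
--         pattern_descriptions = []
--         for pattern_type, count in pattern_counts.items():
--             pattern_name = pattern_type.replace('_', ' ').title()
--             pattern_descriptions.append(f"{count} {pattern_name}")
--
--         summary_parts.append(f"Types: {', '.join(pattern_descriptions)}")
--
--     return ". ".join(summary_parts)
-- ===== SOURCE B (Python) =====
-- def _generate_pattern_summary(pattern_types, total_anomalies):
--     """Generate summary of detected patterns (partition-and-remove grouping)."""
--     if total_anomalies == 0:
--         return "No significant pattern anomalies detected"
--     descriptions = []
--     remaining = list(pattern_types)
--     while remaining:
--         t = remaining[0]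
--         same = [x for x in remaining if x == t]
--         remaining = [x for x in remaining if x != t]
--         descriptions.append(f"{len(same)} {t.replace('_', ' ').title()}")
--     if descriptions:
--         return (f"Detected {total_anomalies} pattern anomalies. Types: "
--                 + ", ".join(descriptions))
--     return f"Detected {total_anomalies} pattern anomalies"
-- ===== Notes on version B (the rewrite author's own statement) =====
-- stated objective: alternative
-- what changed: Replaces A's counting-dict build plus iteration over its items with a partition-and-remove grouping loop: repeatedly take the first remaining type, split the remaining list into equal/unequal elements, emit the group's size, and recurse on the unequal remainder; no dict or count table is ever built.
import Mathlib
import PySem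

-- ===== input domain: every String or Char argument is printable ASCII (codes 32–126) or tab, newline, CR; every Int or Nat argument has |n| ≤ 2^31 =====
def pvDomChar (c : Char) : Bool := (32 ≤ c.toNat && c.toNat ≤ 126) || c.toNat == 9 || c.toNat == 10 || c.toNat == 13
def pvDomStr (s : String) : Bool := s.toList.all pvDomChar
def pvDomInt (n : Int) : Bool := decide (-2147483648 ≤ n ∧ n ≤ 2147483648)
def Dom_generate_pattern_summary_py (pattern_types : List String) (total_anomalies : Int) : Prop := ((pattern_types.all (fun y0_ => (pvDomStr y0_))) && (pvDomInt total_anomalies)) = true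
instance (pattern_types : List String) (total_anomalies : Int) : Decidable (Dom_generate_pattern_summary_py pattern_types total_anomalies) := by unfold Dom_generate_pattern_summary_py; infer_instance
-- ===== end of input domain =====

-- B replaces A's counting-dict build and items iteration with a partition-and-remove grouping
-- loop (take first type, split remaining into equal/unequal, recurse on the unequal remainder);
-- objective: alternative algorithm, no frequency table is ever built.

-- shared helper: Python's str.title(), exact on ASCII (where 'cased' = 'alpha');
-- ported by hand step for step since PySem has no title primitive
def pyTitleAux : List Char → Bool → List Char
  | [], _ => []
  | c :: rest, prevAlpha =>
    (if PySem.Chars.isalpha c then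
        (if prevAlpha then PySem.Chars.lowerChar c else PySem.Chars.upperChar c)
      else c) :: pyTitleAux rest (PySem.Chars.isalpha c)

-- shared helper: pattern_type.replace('_', ' ').title()  (appears verbatim in both Pythons)
def patternName (pt : String) : String :=
  String.ofList (pyTitleAux (PySem.Str.replace pt "_" " ").toList false)

-- ===== PORT A =====
def generate_pattern_summary_py (pattern_types : List String) (total_anomalies : Int) : String :=
  if total_anomalies = 0 then "No significant pattern anomalies detected"
  else
    let pattern_counts : PySem.Dict String Int :=
      pattern_types.foldl (fun d pt => d.insert pt (d.getD pt 0 + 1)) PySem.Dict.empty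
    let summary_parts : List String :=
      ["Detected " ++ PySem.Int.toStr total_anomalies ++ " pattern anomalies"]
    let summary_parts :=
      if pattern_counts.size ≠ 0 then
        let pattern_descriptions := pattern_counts.items.foldl
          (fun acc p => acc ++ [PySem.Int.toStr p.2 ++ " " ++ patternName p.1]) []
        summary_parts ++ ["Types: " ++ PySem.Str.join ", " pattern_descriptions]
      else summary_parts
    PySem.Str.join ". " summary_parts

-- ===== PORT B =====
-- B's while-loop over 'remaining', building 'descriptions'; each step partitions the
-- remaining list by the first element and recurses on the unequal part
def groupDescs : List String → List String
  | [] => []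
  | t :: rest =>
    let same := (t :: rest).filter (fun x => x == t)
    let remaining := (t :: rest).filter (fun x => !(x == t))
    (PySem.Int.toStr (same.length : Int) ++ " " ++ patternName t) :: groupDescs remaining
termination_by l => l.length
decreasing_by
  simp only [List.filter_cons, beq_self_eq_true, Bool.not_true, List.length_cons]
  exact Nat.lt_succ_of_le (List.length_filter_le _ _)

def generate_pattern_summary_py_alt (pattern_types : List String) (total_anomalies : Int) : String :=
  if total_anomalies = 0 then "No significant pattern anomalies detected"
  else
    let descriptions := groupDescs pattern_types
    if descriptions ≠ [] then
      "Detected " ++ PySem.Int.toStr total_anomalies ++ " pattern anomalies. Types: "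
        ++ PySem.Str.join ", " descriptions
    else
      "Detected " ++ PySem.Int.toStr total_anomalies ++ " pattern anomalies"

-- ===== PRECONDITION & SPEC =====
def Spec_generate_pattern_summary_py (pattern_types : List String) (total_anomalies : Int) (out : String) : Prop := out = generate_pattern_summary_py_alt pattern_types total_anomalies
instance (pattern_types : List String) (total_anomalies : Int) (out : String) : Decidable (Spec_generate_pattern_summary_py pattern_types total_anomalies out) := by unfold Spec_generate_pattern_summary_py; infer_instance

-- ===== CLAIM =====
def Claim_equal_generate_pattern_summary_py : Prop := ∀ (pattern_types : List String) (total_anomalies : Int), Dom_generate_pattern_summary_py pattern_types total_anomalies → Spec_generate_pattern_summary_py pattern_types total_anomalies (generate_pattern_summary_py pattern_types total_anomalies)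

-- ===== LEMMAS AND PROOFS =====

theorem join_single (sep a : String) : PySem.Str.join sep [a] = a := by
  apply String.ext
  simp [PySem.Str.toList_join, PySem.Chars.join, List.intercalate]

theorem foldl_append_desc (l : List (String × Int)) (acc : List String) :
    l.foldl (fun acc p => acc ++ [PySem.Int.toStr p.2 ++ " " ++ patternName p.1]) acc
      = acc ++ l.map (fun p => PySem.Int.toStr p.2 ++ " " ++ patternName p.1) := by
  induction l generalizing acc with
  | nil => simp
  | cons p rest ih => simp [ih]

-- Set.add with a cons accumulator: the head passes through, later copies of it are absorbed
theorem foldl_add_cons (l : List String) (t : String) (s : List String) :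
    l.foldl PySem.Set.add (t :: s)
      = t :: (l.filter (fun x => !(x == t))).foldl PySem.Set.add s := by
  induction l generalizing s with
  | nil => simp
  | cons x l ih =>
    by_cases hx : x == t
    · have hxt : x = t := by simpa using hx
      subst hxt
      simp only [List.foldl_cons, List.filter_cons, hx, Bool.not_true, Bool.false_eq_true,
        if_false]
      have hadd : PySem.Set.add (x :: s) x = x :: s := by
        simp [PySem.Set.add, PySem.Set.contains]
      rw [hadd, ih]
    · have hxt : x ≠ t := by simpa using hx
      have hadd : PySem.Set.add (t :: s) x = t :: PySem.Set.add s x := by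
        simp only [PySem.Set.add, PySem.Set.contains]
        split_ifs <;> simp_all
      simp only [List.foldl_cons, List.filter_cons, hx, Bool.not_false, if_true]
      rw [hadd, ih]

theorem ofList_cons (t : String) (rest : List String) :
    PySem.Set.ofList (t :: rest)
      = t :: PySem.Set.ofList (rest.filter (fun x => !(x == t))) := by
  rw [PySem.Set.ofList_eq_foldl, PySem.Set.ofList_eq_foldl, List.foldl_cons]
  have h1 : PySem.Set.add ([] : PySem.Set String) t = [t] := by
    simp [PySem.Set.add, PySem.Set.contains]
  rw [h1, foldl_add_cons]

theorem count_filter_ne (x t : String) (h : x ≠ t) (l : List String) :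
    List.count x (l.filter (fun y => !(y == t))) = List.count x l := by
  exact List.count_filter (by simp [h])

theorem groupDescs_eq (l : List String) :
    groupDescs l = (PySem.Set.ofList l).map
      (fun t => PySem.Int.toStr (PySem.List.count l t) ++ " " ++ patternName t) := by
  induction l using groupDescs.induct with
  | case1 => simp [groupDescs]
  | case2 t rest rem ih =>
    rw [groupDescs]
    rw [ofList_cons, List.map_cons]
    have hrem : ((t :: rest).filter (fun x => !(x == t)))
        = rest.filter (fun x => !(x == t)) := by
      simp
    congr 1
    · rw [show PySem.List.count (t :: rest) t
          = ((((t :: rest)).filter (fun x => x == t)).length : Int) from by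
        simp only [PySem.List.count_eq, List.count_eq_countP, List.countP_eq_length_filter]]
    · have hrw : rem = List.filter (fun x => !(x == t)) (t :: rest) := rfl
      rw [hrw] at ih
      rw [hrem] at ih ⊢
      rw [ih]
      apply List.map_congr_left
      intro a ha
      have hmem : a ∈ rest.filter (fun x => !(x == t)) :=
        (PySem.Set.mem_ofList (xs := rest.filter (fun x => !(x == t))) (y := a)).1 ha
      have hne : a ≠ t := by
        have := List.of_mem_filter hmem
        simpa using this
      congr 2
      simp only [PySem.List.count_eq]
      rw [count_filter_ne a t hne]
      simp [Ne.symm hne]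

-- ===== VERDICT =====
theorem generate_pattern_summary_py_spec : Claim_equal_generate_pattern_summary_py := by
  intro pattern_types total_anomalies _
  unfold Spec_generate_pattern_summary_py generate_pattern_summary_py generate_pattern_summary_py_alt
  by_cases h0 : total_anomalies = 0
  · simp [h0]
  · simp only [h0, PySem.Dict.foldl_insert_getD_add_one_eq_counter, if_false]
    cases pattern_types with
    | nil =>
      simp [groupDescs, PySem.Dict.counter, PySem.Dict.empty, PySem.Dict.size, join_single]
    | cons x l =>
      have hgd : groupDescs (x :: l) ≠ [] := by
        rw [groupDescs_eq, ofList_cons]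
        simp
      have hsz : (PySem.Dict.counter (x :: l)).size ≠ 0 := by
        have hit := PySem.Dict.items_counter (x :: l)
        simp [PySem.Dict.size, hit, ofList_cons]
      simp only [hgd, hsz, ne_eq, not_false_eq_true, if_true]
      rw [PySem.Dict.items_counter, foldl_append_desc, List.nil_append, List.map_map,
        groupDescs_eq]
      have hmaps : ((PySem.Set.ofList (x :: l)).map
            ((fun p => PySem.Int.toStr p.2 ++ " " ++ patternName p.1) ∘
              fun k => (k, ((x :: l).count k : Int))))
          = (PySem.Set.ofList (x :: l)).map
            (fun t => PySem.Int.toStr (PySem.List.count (x :: l) t) ++ " " ++ patternName t) := by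
        apply List.map_congr_left
        intro a _
        simp [PySem.List.count_eq]
      rw [hmaps]
      apply String.ext
      simp [PySem.Chars.join, List.intercalate, String.toList_append]
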